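-- pv_equiv track=rewrite | github.com/TheClapTrap0/Checkers | main.py | GetDistInDir
-- ===== SOURCE A (Python) =====
-- def GetDistInDir(x, dir):
--     count = 1
--     # only going on if the current tile is not on a border
--     left, up, right, down = x % 8 != 0, x > 7, (x + 1) % 8 != 0, x < 56
--     if dir == -9:
--         while left and up:
--             count += 1
--             x += dir
--             left, up, right, down = x % 8 != 0, x > 7, (x + 1) % 8 != 0, x < 56
--     elif dir == -7:
--         while right and up:
--             count += 1
--             x += dir
--             left, up, right, down = x % 8 != 0, x > 7, (x + 1) % 8 != 0, x < 56
--     elif dir == 7: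
--         while left and down:
--             count += 1
--             x += dir
--             left, up, right, down = x % 8 != 0, x > 7, (x + 1) % 8 != 0, x < 56
--     elif dir == 9:
--         while right and down:
--             count += 1
--             x += dir
--             left, up, right, down = x % 8 != 0, x > 7, (x + 1) % 8 != 0, x < 56
--     return count
-- ===== SOURCE B (Python) =====
-- def GetDistInDir(x, dir):
--     row, col = x // 8, x % 8
--     if dir == -9:
--         d = min(row, col)
--     elif dir == -7:
--         d = min(row, 7 - col)
--     elif dir == 7:
--         d = min(7 - row, col)
--     elif dir == 9:
--         d = min(7 - row, 7 - col)
--     else: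
--         return 1
--     return 1 + max(0, d)
-- ===== Notes on version B (the rewrite author's own statement) =====
-- stated objective: simpler
-- what changed: B replaces A's four step-by-step diagonal walk loops with row/col = x//8, x%8 and a closed-form distance-to-edge 1 + max(0, min(a, b)) per direction.
import Mathlib
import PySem

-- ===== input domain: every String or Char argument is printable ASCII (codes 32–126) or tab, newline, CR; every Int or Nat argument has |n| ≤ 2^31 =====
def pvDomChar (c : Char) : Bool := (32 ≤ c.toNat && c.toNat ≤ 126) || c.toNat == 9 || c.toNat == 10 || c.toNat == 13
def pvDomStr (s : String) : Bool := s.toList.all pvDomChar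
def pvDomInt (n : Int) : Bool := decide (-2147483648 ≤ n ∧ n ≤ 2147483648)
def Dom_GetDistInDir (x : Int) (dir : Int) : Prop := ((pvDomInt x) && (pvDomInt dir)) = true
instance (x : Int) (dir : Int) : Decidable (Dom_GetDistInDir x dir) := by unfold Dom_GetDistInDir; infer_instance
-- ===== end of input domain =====

-- B replaces A's step-by-step diagonal walk with a closed-form distance-to-edge formula (simpler, no loop).

-- ===== PORT A =====
-- A's four `while` loops; each recomputes the border flags after every step exactly as the Python does.
def pvLoopNW (x : Int) (count : Int) : Int :=
  if PySem.Int.mod x 8 ≠ 0 ∧ x > 7 then pvLoopNW (x - 9) (count + 1) else count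
termination_by x.toNat
decreasing_by omega

def pvLoopNE (x : Int) (count : Int) : Int :=
  if PySem.Int.mod (x + 1) 8 ≠ 0 ∧ x > 7 then pvLoopNE (x - 7) (count + 1) else count
termination_by x.toNat
decreasing_by omega

def pvLoopSW (x : Int) (count : Int) : Int :=
  if PySem.Int.mod x 8 ≠ 0 ∧ x < 56 then pvLoopSW (x + 7) (count + 1) else count
termination_by (56 - x).toNat
decreasing_by omega

def pvLoopSE (x : Int) (count : Int) : Int :=
  if PySem.Int.mod (x + 1) 8 ≠ 0 ∧ x < 56 then pvLoopSE (x + 9) (count + 1) else count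
termination_by (56 - x).toNat
decreasing_by omega

def GetDistInDir (x : Int) (dir : Int) : Int :=
  if dir = -9 then pvLoopNW x 1
  else if dir = -7 then pvLoopNE x 1
  else if dir = 7 then pvLoopSW x 1
  else if dir = 9 then pvLoopSE x 1
  else 1

-- ===== PORT B =====
def GetDistInDir_alt (x : Int) (dir : Int) : Int :=
  let row := PySem.Int.floordiv x 8
  let col := PySem.Int.mod x 8
  if dir = -9 then 1 + max 0 (min row col)
  else if dir = -7 then 1 + max 0 (min row (7 - col))
  else if dir = 7 then 1 + max 0 (min (7 - row) col)
  else if dir = 9 then 1 + max 0 (min (7 - row) (7 - col))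
  else 1

-- ===== PRECONDITION & SPEC =====
def Spec_GetDistInDir (x : Int) (dir : Int) (out : Int) : Prop := out = GetDistInDir_alt x dir
instance (x : Int) (dir : Int) (out : Int) : Decidable (Spec_GetDistInDir x dir out) := by unfold Spec_GetDistInDir; infer_instance

-- ===== CLAIM (what is proved, stated in full; the proofs are below) =====
def Claim_equal_GetDistInDir : Prop := ∀ (x : Int) (dir : Int), Dom_GetDistInDir x dir → Spec_GetDistInDir x dir (GetDistInDir x dir)

-- ===== LEMMAS AND PROOFS =====

theorem pvLoopNW_eq (x count : Int) :
    pvLoopNW x count = count + max 0 (min (PySem.Int.floordiv x 8) (PySem.Int.mod x 8)) := by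
  fun_induction pvLoopNW x count with
  | case1 x count h ih =>
    rw [ih]
    simp only [PySem.Int.mod_eq_emod_of_pos (b := 8) (by norm_num),
      PySem.Int.floordiv_eq_ediv_of_pos (b := 8) (by norm_num)] at *
    omega
  | case2 x count h =>
    simp only [PySem.Int.mod_eq_emod_of_pos (b := 8) (by norm_num),
      PySem.Int.floordiv_eq_ediv_of_pos (b := 8) (by norm_num)] at *
    omega

theorem pvLoopNE_eq (x count : Int) :
    pvLoopNE x count = count + max 0 (min (PySem.Int.floordiv x 8) (7 - PySem.Int.mod x 8)) := by
  fun_induction pvLoopNE x count with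
  | case1 x count h ih =>
    rw [ih]
    simp only [PySem.Int.mod_eq_emod_of_pos (b := 8) (by norm_num),
      PySem.Int.floordiv_eq_ediv_of_pos (b := 8) (by norm_num)] at *
    omega
  | case2 x count h =>
    simp only [PySem.Int.mod_eq_emod_of_pos (b := 8) (by norm_num),
      PySem.Int.floordiv_eq_ediv_of_pos (b := 8) (by norm_num)] at *
    omega

theorem pvLoopSW_eq (x count : Int) :
    pvLoopSW x count = count + max 0 (min (7 - PySem.Int.floordiv x 8) (PySem.Int.mod x 8)) := by
  fun_induction pvLoopSW x count with
  | case1 x count h ih =>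
    rw [ih]
    simp only [PySem.Int.mod_eq_emod_of_pos (b := 8) (by norm_num),
      PySem.Int.floordiv_eq_ediv_of_pos (b := 8) (by norm_num)] at *
    omega
  | case2 x count h =>
    simp only [PySem.Int.mod_eq_emod_of_pos (b := 8) (by norm_num),
      PySem.Int.floordiv_eq_ediv_of_pos (b := 8) (by norm_num)] at *
    omega

theorem pvLoopSE_eq (x count : Int) :
    pvLoopSE x count = count + max 0 (min (7 - PySem.Int.floordiv x 8) (7 - PySem.Int.mod x 8)) := by
  fun_induction pvLoopSE x count with
  | case1 x count h ih =>
    rw [ih]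
    simp only [PySem.Int.mod_eq_emod_of_pos (b := 8) (by norm_num),
      PySem.Int.floordiv_eq_ediv_of_pos (b := 8) (by norm_num)] at *
    omega
  | case2 x count h =>
    simp only [PySem.Int.mod_eq_emod_of_pos (b := 8) (by norm_num),
      PySem.Int.floordiv_eq_ediv_of_pos (b := 8) (by norm_num)] at *
    omega

-- ===== VERDICT (by name: the statement is the Claim_ definition above) =====
theorem GetDistInDir_spec : Claim_equal_GetDistInDir := by
  intro x dir _
  unfold Spec_GetDistInDir GetDistInDir GetDistInDir_alt
  split_ifs <;> simp [pvLoopNW_eq, pvLoopNE_eq, pvLoopSW_eq, pvLoopSE_eq]
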